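-- pv_equiv track=rewrite | github.com/yhydev/news_collect | translate.py | __section_slice
-- ===== SOURCE A (Python) =====
-- def __section_slice(src,maxlen):
--
-- 	if len(src) <=  maxlen:
-- 		return [src]
--
-- 	i = maxlen
--
-- 	section_arr = [];
--
-- 	while i > 0:
-- 		if src[i] == "." and src[i-1].islower():
-- 			section_arr.append(src[0 : i + 1])
--
-- 			section = __section_slice(src[i + 1:],maxlen)
-- 			section_arr.extend(section)
-- 			break
-- 		i = i - 1
-- 	return section_arr
-- ===== SOURCE B (Python) =====
-- def __section_slice(src, maxlen):
--     # Iterative: accumulate chunks in a list; the boundary is found by an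
--     # ascending scan that keeps the LAST match (= A's first match scanning down).
--     result = []
--     while len(src) > maxlen:
--         cut = None
--         for i in range(1, maxlen + 1):
--             if src[i] == "." and src[i - 1].islower():
--                 cut = i
--         if cut is None:
--             return result
--         result.append(src[:cut + 1])
--         src = src[cut + 1:]
--     result.append(src)
--     return result
-- ===== Notes on version B (the rewrite author's own statement) =====
-- stated objective: alternative
-- what changed: Replaced A's recursion (each level re-calling __section_slice on the tail and extending the result) by a single iterative loop with an accumulator list, and replaced A's descending first-match boundary scan by an ascending scan that keeps the last matching index.
import Mathlib
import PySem

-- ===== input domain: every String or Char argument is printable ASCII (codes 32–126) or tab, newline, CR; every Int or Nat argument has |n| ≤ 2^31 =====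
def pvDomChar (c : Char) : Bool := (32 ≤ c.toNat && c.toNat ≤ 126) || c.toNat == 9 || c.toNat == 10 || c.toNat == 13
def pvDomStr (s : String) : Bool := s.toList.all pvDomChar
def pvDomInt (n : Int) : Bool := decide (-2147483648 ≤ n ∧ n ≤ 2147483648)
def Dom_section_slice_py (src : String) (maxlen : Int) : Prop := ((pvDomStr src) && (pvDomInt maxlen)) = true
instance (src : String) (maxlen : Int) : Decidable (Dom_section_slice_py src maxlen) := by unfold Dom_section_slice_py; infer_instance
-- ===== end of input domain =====

-- B replaces A's recursion by an iterative accumulator loop and A's descending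
-- first-match boundary scan by an ascending last-match scan (objective: alternative).

-- ===== PORT A =====
-- the sentence-boundary test 'src[i] == "." and src[i-1].islower()' (identical text in both sources)
def boundaryAt (cs : List Char) (i : Int) : Bool :=
  (PySem.List.pyGet? cs i == some '.') && (PySem.List.pyGet? cs (i - 1)).any PySem.Chars.islower

-- A's inner 'while i > 0' countdown: the first i from the top with a boundary
def sliceAFind (cs : List Char) : Nat → Option Nat
  | 0 => none
  | j + 1 => if boundaryAt cs ((j + 1 : Nat) : Int) then some (j + 1) else sliceAFind cs j

-- the found index lies in [1, n]  (cited by sliceA's decreasing_by)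
theorem sliceAFind_bounds {cs : List Char} {n i : Nat} (h : sliceAFind cs n = some i) :
    1 ≤ i ∧ i ≤ n := by
  induction n with
  | zero => simp [sliceAFind] at h
  | succ j ih =>
    rw [sliceAFind] at h
    split at h
    · cases h; omega
    · have := ih h; omega

def sliceA (cs : List Char) (maxlen : Int) : List String :=
  if (cs.length : Int) ≤ maxlen then [String.ofList cs]
  else
    match h : sliceAFind cs maxlen.toNat with
    | none => []
    | some i =>
        String.ofList (PySem.List.slice cs (some 0) (some ((i + 1 : Nat) : Int))) ::
          sliceA (PySem.List.slice cs (some ((i + 1 : Nat) : Int)) none) maxlen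
termination_by cs.length
decreasing_by
  have hb := sliceAFind_bounds h
  rw [PySem.List.slice_from_natCast, List.length_drop]
  omega

def section_slice_py (src : String) (maxlen : Int) : List String :=
  sliceA src.toList maxlen

-- ===== PORT B =====
-- B's ascending 'for i in range(1, maxlen+1)' scan keeping the LAST boundary found
def sliceBScan (cs : List Char) (maxlen : Int) : Option Int :=
  (PySem.List.pyRange 1 (maxlen + 1) 1).foldl
    (fun cut i => if boundaryAt cs i then some i else cut) none

-- a last-match fold yields the accumulator or a list element  (cited by sliceBScan_bounds)
theorem foldl_lastmatch_mem {α : Type} (p : α → Bool) (l : List α)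
    (acc : Option α) {x : α}
    (h : l.foldl (fun cut i => if p i then some i else cut) acc = some x) :
    acc = some x ∨ x ∈ l := by
  induction l generalizing acc with
  | nil => exact Or.inl h
  | cons y l ih =>
    rw [List.foldl_cons] at h
    rcases ih _ h with h' | h'
    · by_cases hy : p y
      · rw [if_pos hy] at h'; cases h'; simp
      · rw [if_neg hy] at h'; exact Or.inl h'
    · simp [h']

-- the scanned cut lies in [1, maxlen]  (cited by sliceBLoop's decreasing_by)
theorem sliceBScan_bounds {cs : List Char} {maxlen cut : Int}
    (h : sliceBScan cs maxlen = some cut) : 1 ≤ cut ∧ cut ≤ maxlen := by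
  rcases foldl_lastmatch_mem (boundaryAt cs) _ _ h with h' | h'
  · cases h'
  · have := PySem.List.mem_pyRange_one.mp h'; omega

def sliceBLoop (cs : List Char) (maxlen : Int) (result : List String) : List String :=
  if (cs.length : Int) ≤ maxlen then result ++ [String.ofList cs]
  else
    match h : sliceBScan cs maxlen with
    | none => result
    | some cut =>
        sliceBLoop (PySem.List.slice cs (some (cut + 1)) none) maxlen
          (result ++ [String.ofList (PySem.List.slice cs none (some (cut + 1)))])
termination_by cs.length
decreasing_by
  have hb := sliceBScan_bounds h
  rw [PySem.List.slice_from (cs) (a := cut + 1) (by omega), List.length_drop]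
  omega

def section_slice_py_alt (src : String) (maxlen : Int) : List String :=
  sliceBLoop src.toList maxlen []

-- ===== PRECONDITION & SPEC =====
def Spec_section_slice_py (src : String) (maxlen : Int) (out : List String) : Prop := out = section_slice_py_alt src maxlen
instance (src : String) (maxlen : Int) (out : List String) : Decidable (Spec_section_slice_py src maxlen out) := by unfold Spec_section_slice_py; infer_instance

-- ===== CLAIM (what is proved, stated in full; the proofs are below) =====
def Claim_equal_section_slice_py : Prop := ∀ (src : String) (maxlen : Int), Dom_section_slice_py src maxlen → Spec_section_slice_py src maxlen (section_slice_py src maxlen)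

-- ===== LEMMAS AND PROOFS =====

-- a left fold keeping the last match equals the first match of the reversed list
theorem foldl_lastmatch {α : Type} (p : α → Bool) (l : List α) (acc : Option α) :
    l.foldl (fun cut i => if p i then some i else cut) acc
      = (l.reverse.find? p).elim acc some := by
  induction l generalizing acc with
  | nil => simp
  | cons x l ih =>
    rw [List.foldl_cons, ih, List.reverse_cons, List.find?_append]
    cases hq : l.reverse.find? p with
    | some y => simp
    | none => by_cases hx : p x <;> simp [hx]

-- the ascending last-match scan over [1, n] equals A's descending first-match scan
theorem find_desc (cs : List Char) (n : Nat) :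
    ((PySem.List.pyRange 1 ((n : Int) + 1) 1).reverse.find? (boundaryAt cs)).elim none some
      = (sliceAFind cs n).map (fun k => (k : Int)) := by
  induction n with
  | zero =>
    rw [PySem.List.pyRange_one_eq_nil (by norm_num)]
    simp [sliceAFind]
  | succ j ih =>
    have hcast : ((j + 1 : Nat) : Int) = ((j : Int) + 1) := by push_cast; ring
    have hcast1 : (((j + 1 : Nat) : Int) + 1) = ((j : Int) + 1) + 1 := by push_cast; ring
    rw [hcast1, PySem.List.pyRange_one_succ_right (by omega), List.reverse_append]
    rw [sliceAFind]
    by_cases hb : boundaryAt cs ((j + 1 : Nat) : Int)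
    · rw [if_pos hb]
      rw [hcast] at hb
      simp [hb, hcast]
    · rw [if_neg hb]
      rw [hcast] at hb
      simp only [List.reverse_singleton, List.singleton_append, List.find?_cons, hb]
      exact ih

theorem scan_eq (cs : List Char) (maxlen : Int) :
    sliceBScan cs maxlen = (sliceAFind cs maxlen.toNat).map (fun k => (k : Int)) := by
  unfold sliceBScan
  rw [foldl_lastmatch]
  by_cases hm : 0 ≤ maxlen
  · obtain ⟨n, rfl⟩ := Int.eq_ofNat_of_zero_le hm
    rw [Int.toNat_natCast]
    exact find_desc cs n
  · rw [PySem.List.pyRange_one_eq_nil (by omega)]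
    have h0 : maxlen.toNat = 0 := by omega
    simp [h0, sliceAFind]

theorem loop_eq (maxlen : Int) (cs : List Char) :
    ∀ acc, sliceBLoop cs maxlen acc = acc ++ sliceA cs maxlen := by
  induction cs using sliceA.induct (maxlen := maxlen) with
  | case1 cs hle =>
    intro acc
    rw [sliceBLoop, sliceA, if_pos hle, if_pos hle]
  | case2 cs hle hnone =>
    intro acc
    rw [sliceBLoop, sliceA, if_neg hle, if_neg hle]
    have hscan : sliceBScan cs maxlen = none := by
      rw [scan_eq, hnone]; rfl
    rw [hscan, hnone, List.append_nil]
  | case3 cs hle i hsome ih =>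
    intro acc
    rw [sliceBLoop, sliceA, if_neg hle, if_neg hle]
    have hscan : sliceBScan cs maxlen = some ((i : Nat) : Int) := by
      rw [scan_eq, hsome]; rfl
    rw [hscan, hsome]
    dsimp only
    have hc : ((i : Nat) : Int) + 1 = ((i + 1 : Nat) : Int) := by push_cast; ring
    rw [hc, ih, List.append_assoc, PySem.List.slice_zero_start]
    rfl

-- ===== VERDICT (by name: the statement is the Claim_ definition above) =====
theorem section_slice_py_spec : Claim_equal_section_slice_py := by
  intro src maxlen _
  unfold Spec_section_slice_py section_slice_py section_slice_py_alt
  rw [loop_eq, List.nil_append]
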